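-- pv_equiv track=rewrite | github.com/boknowswiki/mytraning | lintcode/python/0801_backpack_X.py | backPackX
-- ===== SOURCE A (Python) =====
-- def backPackX(n):
--     # write your code here
--     # dp[i][j] for the ith merchandise and j yuan, the max goods we can purchase
--     # dp[i][j] = max(dp[i-1][j], dp[i][j-prices[i-1]]+prices[i-1]) 0<=i<=3
--     # ret = n - dp[m][n]
--
--     prices = [150, 250, 350]
--     m = 3
--
--     dp = [[0] * (n+1) for i in range(m+1)]
--
--     for i in range(1, m+1):
--         for j in range(1, n+1):
--             dp[i][j] = dp[i-1][j]
--             if j >= prices[i-1]: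
--                 dp[i][j] = max(dp[i][j], dp[i][j-prices[i-1]]+prices[i-1])
--
--     return n-dp[m][n]
-- ===== SOURCE B (Python) =====
-- def backPackX(n):
--     # Closed form: achievable sums 150a+250b+350c are exactly 50*k for k in
--     # the numerical semigroup <3,5,7> = all integers >= 3 except 4 (and 0).
--     k = n // 50
--     if k < 3:
--         best = 0
--     elif k == 4:
--         best = 3
--     else:
--         best = k
--     return n - 50 * best
-- ===== Notes on version B (the rewrite author's own statement) =====
-- stated objective: faster
-- what changed: Replaced the O(n) three-row knapsack DP with an O(1) closed form: achievable sums 150a+250b+350c are exactly 50k for k in the numerical semigroup <3,5,7> (all integers >= 3 except 4), so best = 50*g(n//50).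
import Mathlib
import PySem

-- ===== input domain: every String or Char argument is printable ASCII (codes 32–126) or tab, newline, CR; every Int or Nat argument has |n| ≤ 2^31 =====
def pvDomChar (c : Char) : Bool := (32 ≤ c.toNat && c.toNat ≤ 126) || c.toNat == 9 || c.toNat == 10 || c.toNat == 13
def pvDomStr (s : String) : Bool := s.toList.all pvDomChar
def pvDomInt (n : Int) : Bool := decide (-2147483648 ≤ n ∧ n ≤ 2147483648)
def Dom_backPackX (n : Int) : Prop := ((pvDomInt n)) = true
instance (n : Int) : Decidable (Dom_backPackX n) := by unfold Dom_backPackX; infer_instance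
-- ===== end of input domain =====

-- B replaces A's O(n) knapsack DP by an O(1) closed form over the semigroup <150,250,350>.
-- (Equivalence is about the return value; neither program mutates its input.)

-- ===== PORT A =====
-- One inner loop of A: for j in range(1, n+1): dp[i][j] = dp[i-1][j]; if j >= p: dp[i][j] = max(dp[i][j], dp[i][j-p]+p).
-- Indices j, j-p are always in range 0..n here, so getD _ 0 is exact.
def pvRowA (N : Nat) (p : Int) (prev : List Int) : List Int :=
  (List.range N).foldl (fun cur j0 =>
      let j := j0 + 1
      let v := prev.getD j 0
      let v := if p ≤ (j : Int) then max v (cur.getD (j - p.toNat) 0 + p) else v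
      cur.set j v)
    (List.replicate (N + 1) 0)

def backPackX (n : Int) : Int :=
  let prices : List Int := [150, 250, 350]
  let N := n.toNat
  let row0 : List Int := List.replicate (N + 1) 0
  let dpm := prices.foldl (fun prev p => pvRowA N p prev) row0
  n - dpm.getD N 0

-- ===== PORT B =====
def backPackX_alt (n : Int) : Int :=
  let k := PySem.Int.floordiv n 50
  let best : Int := if k < 3 then 0 else if k = 4 then 3 else k
  n - 50 * best

-- ===== PRECONDITION & SPEC =====
-- Pre_ excludes n < 0, where A raises IndexError (dp[3][n] on empty rows).
def Pre_backPackX (n : Int) : Prop := 0 ≤ n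
instance (n : Int) : Decidable (Pre_backPackX n) := by unfold Pre_backPackX; infer_instance
def pvWitness_backPackX : Int := 700

def Spec_backPackX (n : Int) (out : Int) : Prop := out = backPackX_alt n
instance (n : Int) (out : Int) : Decidable (Spec_backPackX n out) := by unfold Spec_backPackX; infer_instance

-- ===== CLAIM (what is proved, stated in full; the proofs are below) =====
def Claim_equal_backPackX : Prop := ∀ (n : Int), Dom_backPackX n → Pre_backPackX n → Spec_backPackX n (backPackX n)

-- ===== LEMMAS AND PROOFS =====

-- closed forms for the three dp rows (row i at index j), as functions of j
def pvT1 (j : Nat) : Int := 150 * ((j / 150 : Nat) : Int)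
def pvF2 (k : Nat) : Int := if k < 3 then 0 else if k = 4 then 3 else if k = 7 then 6 else (k : Int)
def pvT2 (j : Nat) : Int := 50 * pvF2 (j / 50)
def pvF3 (k : Nat) : Int := if k < 3 then 0 else if k = 4 then 3 else (k : Int)
def pvT3 (j : Nat) : Int := 50 * pvF3 (j / 50)

theorem pvRowA_aux (N : Nat) (p : Int) (prev : List Int) (s t : Nat → Int)
    (hp : 0 < p) (hs : ∀ i, i ≤ N → prev.getD i 0 = s i) (ht0 : t 0 = 0)
    (hrec : ∀ j, 1 ≤ j → j ≤ N →
      t j = if p ≤ (j : Int) then max (s j) (t (j - p.toNat) + p) else s j) :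
    ∀ m, m ≤ N →
      (((List.range m).foldl (fun cur j0 =>
          let j := j0 + 1
          let v := prev.getD j 0
          let v := if p ≤ (j : Int) then max v (cur.getD (j - p.toNat) 0 + p) else v
          cur.set j v) (List.replicate (N + 1) 0)).length = N + 1 ∧
       ∀ i, (((List.range m).foldl (fun cur j0 =>
          let j := j0 + 1
          let v := prev.getD j 0
          let v := if p ≤ (j : Int) then max v (cur.getD (j - p.toNat) 0 + p) else v
          cur.set j v) (List.replicate (N + 1) 0)).getD i 0)
            = if 1 ≤ i ∧ i ≤ m then t i else 0) := by
  intro m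
  induction m with
  | zero =>
    intro _
    refine ⟨by simp, fun i => ?_⟩
    simp [List.getD_eq_getElem?_getD, List.getElem?_replicate]
    split_ifs <;> simp_all
  | succ m ih =>
    intro hm
    obtain ⟨hlen, hval⟩ := ih (Nat.le_of_succ_le hm)
    rw [List.range_succ, List.foldl_append, List.foldl_cons, List.foldl_nil]
    simp only []
    set C := ((List.range m).foldl (fun cur j0 =>
          let j := j0 + 1
          let v := prev.getD j 0
          let v := if p ≤ (j : Int) then max v (cur.getD (j - p.toNat) 0 + p) else v
          cur.set j v) (List.replicate (N + 1) 0)) with hC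
    -- the value written at index m+1 is t (m+1)
    have hv : (if p ≤ ((m + 1 : Nat) : Int) then
          max (prev.getD (m + 1) 0) (C.getD (m + 1 - p.toNat) 0 + p)
        else prev.getD (m + 1) 0) = t (m + 1) := by
      rw [hs (m + 1) hm, hrec (m + 1) (Nat.le_add_left 1 m) hm]
      split_ifs with hg
      · have hpt : 1 ≤ p.toNat := by omega
        have hidx : m + 1 - p.toNat ≤ m := by omega
        rw [hval (m + 1 - p.toNat)]
        by_cases h1 : 1 ≤ m + 1 - p.toNat
        · simp [h1, hidx]
        · have h0 : m + 1 - p.toNat = 0 := by omega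
          simp [h0, ht0]
      · rfl
    refine ⟨by simp [hlen], fun i => ?_⟩
    rw [List.getD_eq_getElem?_getD, List.getElem?_set]
    by_cases hi : i = m + 1
    · subst hi
      have : m + 1 < C.length := by omega
      simp only [this, if_pos trivial, Option.getD_some]
      have := hv
      simp only [] at this ⊢
      rw [this]
      simp
    · have hne : ¬ (m + 1 = i) := fun h => hi h.symm
      rw [if_neg hne, ← List.getD_eq_getElem?_getD, hval i]
      by_cases h1 : 1 ≤ i
      · by_cases h2 : i ≤ m
        · simp [h1, h2, Nat.le_succ_of_le h2]
        · have : ¬ i ≤ m + 1 := by omega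
          simp [h2, this]
      · simp [h1]

theorem pvRowA_spec (N : Nat) (p : Int) (prev : List Int) (s t : Nat → Int)
    (hp : 0 < p) (hs : ∀ i, i ≤ N → prev.getD i 0 = s i) (ht0 : t 0 = 0)
    (hrec : ∀ j, 1 ≤ j → j ≤ N →
      t j = if p ≤ (j : Int) then max (s j) (t (j - p.toNat) + p) else s j) :
    ∀ i, i ≤ N → (pvRowA N p prev).getD i 0 = t i := by
  intro i hi
  have h := (pvRowA_aux N p prev s t hp hs ht0 hrec N le_rfl).2 i
  unfold pvRowA
  rw [h]
  by_cases h1 : 1 ≤ i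
  · simp [h1, hi]
  · have h0 : i = 0 := by omega
    simp [h0, ht0]

theorem pvT1_spec (n : Int) (_h : 0 ≤ n) :
    ∀ i, i ≤ n.toNat → (pvRowA n.toNat 150 (List.replicate (n.toNat + 1) 0)).getD i 0 = pvT1 i := by
  refine pvRowA_spec n.toNat 150 _ (fun _ => 0) pvT1 (by norm_num) ?_ (by simp [pvT1]) ?_
  · intro i hi
    rw [List.getD_eq_getElem?_getD, List.getElem?_replicate]
    simp [Nat.lt_succ_of_le hi]
  · intro j h1 hN
    unfold pvT1
    beta_reduce
    split_ifs <;> omega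

theorem pvT2_spec (n : Int) (h : 0 ≤ n) :
    ∀ i, i ≤ n.toNat → (pvRowA n.toNat 250 (pvRowA n.toNat 150 (List.replicate (n.toNat + 1) 0))).getD i 0 = pvT2 i := by
  refine pvRowA_spec n.toNat 250 _ pvT1 pvT2 (by norm_num) (pvT1_spec n h) (by simp [pvT2, pvF2]) ?_
  intro j h1 hN
  unfold pvT2 pvF2 pvT1
  split_ifs <;> omega

theorem pvT3_spec (n : Int) (h : 0 ≤ n) :
    ∀ i, i ≤ n.toNat → (pvRowA n.toNat 350 (pvRowA n.toNat 250 (pvRowA n.toNat 150 (List.replicate (n.toNat + 1) 0)))).getD i 0 = pvT3 i := by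
  refine pvRowA_spec n.toNat 350 _ pvT2 pvT3 (by norm_num) (pvT2_spec n h) (by simp [pvT3, pvF3]) ?_
  intro j h1 hN
  unfold pvT3 pvF3 pvT2 pvF2
  split_ifs <;> omega

-- ===== VERDICT (by name: the statement is the Claim_ definition above) =====
theorem backPackX_spec : Claim_equal_backPackX := by
  intro n _ hn
  unfold Spec_backPackX backPackX backPackX_alt
  simp only [List.foldl]
  rw [pvT3_spec n hn n.toNat le_rfl]
  unfold Pre_backPackX at hn
  unfold pvT3 pvF3 PySem.Int.floordiv
  rw [Int.fdiv_eq_ediv_of_nonneg n (by norm_num : (0:Int) ≤ 50)]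
  have h50 : n / 50 = ((n.toNat / 50 : Nat) : Int) := by omega
  rw [h50]
  split_ifs <;> omega
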